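-- pv_equiv track=rewrite | github.com/AgoraIO-Extensions/Agora-C_Sharp-SDK | ci/build/convert_notes.py | get_line_split_str
-- ===== SOURCE A (Python) =====
-- def get_line_split_str(str_):
--     lines = str_.split("\n")
--     second_line = lines[1]
--     split_list = ["\n"]
--     for i in range(0, len(second_line)):
--         if second_line[i] == ' ':
--             split_list.append(' ')
--         else:
--             break
--     split_list.pop()
--     return ''.join(split_list)
-- ===== SOURCE B (Python) =====
-- def get_line_split_str(str_):
--     second = str_.split("\n")[1]
--     k = len(second) - len(second.lstrip(' '))
--     return ("\n" + " " * k)[:-1]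
-- ===== Notes on version B (the rewrite author's own statement) =====
-- stated objective: simpler
-- what changed: Replaces the char-by-char accumulate loop plus list pop/join with a closed-form count of leading spaces via lstrip and direct string construction sliced with [:-1].
import Mathlib
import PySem

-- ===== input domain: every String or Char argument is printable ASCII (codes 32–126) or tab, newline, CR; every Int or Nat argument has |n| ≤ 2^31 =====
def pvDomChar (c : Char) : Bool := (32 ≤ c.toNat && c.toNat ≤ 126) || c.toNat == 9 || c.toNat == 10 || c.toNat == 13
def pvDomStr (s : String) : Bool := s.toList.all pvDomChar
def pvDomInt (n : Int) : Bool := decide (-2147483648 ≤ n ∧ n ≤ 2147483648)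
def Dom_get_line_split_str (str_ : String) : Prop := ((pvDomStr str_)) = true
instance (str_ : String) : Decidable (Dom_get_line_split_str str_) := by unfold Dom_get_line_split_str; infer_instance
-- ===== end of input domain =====

-- B replaces A's char-by-char accumulate loop + pop/join with a closed-form
-- count of leading spaces and direct construction sliced with [:-1] (simpler).


-- ===== PORT A =====
-- the for-loop with break: append a space element while second_line[i] is a space, stop at the first other char (or end)
def pvALoop (second_line : String) (i : Nat) (acc : List String) : List String :=
  if _h : i < PySem.Str.len second_line then
    match PySem.Str.pyGet? second_line (i : Int) with
    | some c => if c == ' ' then pvALoop second_line (i + 1) (acc ++ [" "]) else acc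
    | none => acc
  else acc
termination_by second_line.length - i
decreasing_by simp [PySem.Str.len] at _h; omega

-- everything after 'second_line = lines[1]': build split_list, pop, join
def pvATail (second_line : String) : String :=
  let split_list := pvALoop second_line 0 ["\n"]
  match PySem.List.pop? split_list with
  | none => ""   -- unreachable: split_list starts with the newline element, never empty
  | some (_, rest) => PySem.Str.join "" rest

def get_line_split_str (str_ : String) : String :=
  match PySem.Str.split? str_ "\n" with
  | none => ""   -- unreachable: the separator is nonempty
  | some lines =>
    match PySem.List.pyGet? lines 1 with
    | none => ""   -- IndexError in Python (no newline in str_); excluded by Pre_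
    | some second_line => pvATail second_line

-- ===== PORT B =====
def pvBTail (second : String) : String :=
  -- the lstrip call with a single-space chars argument: ported by hand as dropWhile of that character (exact)
  let k := second.toList.length - (second.toList.dropWhile (· == ' ')).length
  -- the newline-plus-k-spaces concatenation ported by hand as the char list '\n' :: replicate k ' ' (exact)
  PySem.Str.slice (String.ofList ('\n' :: List.replicate k ' ')) none (some (-1))

def get_line_split_str_alt (str_ : String) : String :=
  match PySem.Str.split? str_ "\n" with
  | none => ""   -- unreachable: the separator is nonempty
  | some lines =>
    match PySem.List.pyGet? lines 1 with
    | none => ""   -- IndexError in Python (no newline in str_); excluded by Pre_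
    | some second => pvBTail second

-- ===== PRECONDITION & SPEC =====
-- Pre_ excludes exactly the strings containing no newline: there lines[1] raises IndexError in both Pythons.
def Pre_get_line_split_str (str_ : String) : Prop := PySem.Str.isIn "\n" str_ = true
instance (str_ : String) : Decidable (Pre_get_line_split_str str_) := by unfold Pre_get_line_split_str; infer_instance
def pvWitness_get_line_split_str : String := "a\n  b"

def Spec_get_line_split_str (str_ : String) (out : String) : Prop := out = get_line_split_str_alt str_
instance (str_ : String) (out : String) : Decidable (Spec_get_line_split_str str_ out) := by unfold Spec_get_line_split_str; infer_instance

-- ===== CLAIM (what is proved, stated in full; the proofs are below) =====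
def Claim_equal_get_line_split_str : Prop := ∀ (str_ : String), Dom_get_line_split_str str_ → Pre_get_line_split_str str_ → Spec_get_line_split_str str_ (get_line_split_str str_)

-- ===== LEMMAS AND PROOFS =====

-- A's loop appends one space element per leading space of second_line from position i on
theorem pvALoop_eq (second_line : String) (i : Nat) (acc : List String) :
    pvALoop second_line i acc
      = acc ++ List.replicate (((second_line.toList.drop i).takeWhile (· == ' ')).length) " " := by
  fun_induction pvALoop second_line i acc with
  | case1 i acc h c hget htrue ih =>
    have hi : i < second_line.toList.length := by simp only [PySem.Str.len] at h; omega
    have hc : second_line.toList[i] = c := by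
      have := hget; simp at this
      simpa [List.getElem?_eq_getElem hi] using this
    rw [ih, List.drop_eq_getElem_cons hi, hc, List.takeWhile_cons_of_pos (by simpa using htrue)]
    simp [List.replicate_succ]
  | case2 i acc h c hget hfalse =>
    have hi : i < second_line.toList.length := by simp only [PySem.Str.len] at h; omega
    have hc : second_line.toList[i] = c := by
      have := hget; simp at this
      simpa [List.getElem?_eq_getElem hi] using this
    rw [List.drop_eq_getElem_cons hi, hc, List.takeWhile_cons_of_neg (by simpa using hfalse)]
    simp
  | case3 i acc h hget =>
    have hi : i < second_line.toList.length := by simp only [PySem.Str.len] at h; omega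
    have := hget; simp [List.getElem?_eq_getElem hi] at this
  | case4 i acc h =>
    have hi : second_line.toList.length ≤ i := by simp only [PySem.Str.len] at h; omega
    rw [List.drop_eq_nil_of_le hi]
    simp

-- the two tails agree for every second line
theorem pvJoin_chars (k : Nat) :
    PySem.Chars.join [] (List.map String.toList (("\n" :: List.replicate k " ").dropLast))
      = ('\n' :: List.replicate k ' ').dropLast := by
  cases k with
  | zero => rfl
  | succ j =>
    rw [List.replicate_succ' (n := j), show "\n" :: (List.replicate j " " ++ [" "]) = ("\n" :: List.replicate j " ") ++ [" "] from rfl, List.dropLast_concat]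
    rw [List.replicate_succ' (n := j) (a := ' '), show '\n' :: (List.replicate j ' ' ++ [' ']) = ('\n' :: List.replicate j ' ') ++ [' '] from rfl, List.dropLast_concat]
    have hmap : List.map String.toList ("\n" :: List.replicate j " ") = ('\n' :: List.replicate j ' ').map (fun c => [c]) := by
      simp [List.map_replicate]
    rw [hmap, PySem.Chars.join_nil_singletons]

theorem pvTail_eq (second : String) : pvATail second = pvBTail second := by
  unfold pvATail pvBTail
  rw [pvALoop_eq]
  have hk : second.toList.length - (second.toList.dropWhile (· == ' ')).length
      = ((second.toList.drop 0).takeWhile (· == ' ')).length := by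
    have h2 : (second.toList.takeWhile (· == ' ')).length + (second.toList.dropWhile (· == ' ')).length = second.toList.length := by
      rw [← List.length_append, List.takeWhile_append_dropWhile]
    simp only [List.drop_zero]
    omega
  rw [hk]
  generalize ((second.toList.drop 0).takeWhile (· == ' ')).length = k
  show (match PySem.List.pop? ("\n" :: List.replicate k " ") with
        | none => ""
        | some (_, rest) => PySem.Str.join "" rest)
       = PySem.Str.slice (String.ofList ('\n' :: List.replicate k ' ')) none (some (-1))
  have hidx : PySem.List.pyIdx? (k + 1) (-1) = some k := by
    simp [PySem.List.pyIdx?]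
  obtain ⟨x, hx⟩ : ∃ x, ("\n" :: List.replicate k " ")[k]? = some x :=
    ⟨_, List.getElem?_eq_getElem (by simp)⟩
  have hpop : PySem.List.pop? ("\n" :: List.replicate k " ")
      = some (x, ("\n" :: List.replicate k " ").eraseIdx k) := by
    simp [PySem.List.pop?, hidx]
    rw [List.getElem?_eq_getElem (by simp)] at hx
    exact Option.some.inj hx
  rw [hpop]
  have herase : ("\n" :: List.replicate k " ").eraseIdx k = ("\n" :: List.replicate k " ").dropLast :=
    (List.dropLast_eq_eraseIdx (by simp)).symm
  simp only [herase, PySem.Str.join, PySem.Str.slice, PySem.Chars.slice, PySem.List.slice_to_neg_one]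
  congr 1
  simpa using pvJoin_chars k

-- ===== VERDICT (by name: the statement is the Claim_ definition above) =====
theorem get_line_split_str_spec : Claim_equal_get_line_split_str := by
  intro str_ _ _
  unfold Spec_get_line_split_str get_line_split_str get_line_split_str_alt
  cases PySem.Str.split? str_ "\n" with
  | none => rfl
  | some lines =>
    dsimp only
    cases PySem.List.pyGet? lines 1 with
    | none => rfl
    | some second => exact pvTail_eq second
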